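-- pv_equiv track=rewrite | github.com/JoshInTheShell/B-R.A.D. | visual-media-tool/src/vmt/analyzer.py | extract_emotions
-- ===== SOURCE A (Python) =====
-- from typing import List, Dict, Iterable, Tuple
--
-- EMOTION_LEX = {
--     "happy": ["joy", "happy", "cheer", "delight", "optimistic", "hopeful"],
--     "sad": ["sad", "melancholy", "bittersweet", "lonely", "regret"],
--     "angry": ["angry", "rage", "furious", "irritated", "frustrated"],
--     "fear": ["fear", "anxious", "afraid", "tense", "worried"],
--     "surprise": ["surprise", "shocked", "unexpected"],
--     "calm": ["calm", "peaceful", "serene", "relaxed"],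
--     "romance": ["love", "romantic", "tender"],
--     "hope": ["hope", "hopeful", "aspire"],
-- }
--
-- def extract_emotions(text: str) -> List[str]:
--     t = text.lower()
--     hits = []
--     for label, kws in EMOTION_LEX.items():
--         if any(k in t for k in kws):
--             hits.append(label)
--     # stable ordering
--     order = ["happy","calm","hope","romance","surprise","fear","sad","angry"]
--     return [e for e in order if e in hits]
-- ===== SOURCE B (Python) =====
-- EMOTION_LEX = {
--     "happy": ["joy", "happy", "cheer", "delight", "optimistic", "hopeful"],
--     "sad": ["sad", "melancholy", "bittersweet", "lonely", "regret"],
--     "angry": ["angry", "rage", "furious", "irritated", "frustrated"],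
--     "fear": ["fear", "anxious", "afraid", "tense", "worried"],
--     "surprise": ["surprise", "shocked", "unexpected"],
--     "calm": ["calm", "peaceful", "serene", "relaxed"],
--     "romance": ["love", "romantic", "tender"],
--     "hope": ["hope", "hopeful", "aspire"],
-- }
--
-- # inverted index: every keyword paired with its emotion label
-- KEYWORD_INDEX = [(k, label) for label, kws in EMOTION_LEX.items() for k in kws]
--
-- ORDER = ["happy", "calm", "hope", "romance", "surprise", "fear", "sad", "angry"]
--
-- def extract_emotions(text):
--     # single left-to-right scan over the text: at each position, record the label
--     # of every keyword that starts there; then emit labels in canonical order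
--     t = text.lower()
--     found = set()
--     for i in range(len(t)):
--         for k, label in KEYWORD_INDEX:
--             if t.startswith(k, i):
--                 found.add(label)
--     return [e for e in ORDER if e in found]
-- ===== Notes on version B (the rewrite author's own statement) =====
-- stated objective: alternative
-- what changed: Replaces A's per-label substring tests (build a hits list over dict order, then filter the canonical order list by membership) with a single left-to-right scan over the text positions using an inverted keyword-to-label index, accumulating a set of found labels and then emitting the canonical order filtered by that set.
import Mathlib
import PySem

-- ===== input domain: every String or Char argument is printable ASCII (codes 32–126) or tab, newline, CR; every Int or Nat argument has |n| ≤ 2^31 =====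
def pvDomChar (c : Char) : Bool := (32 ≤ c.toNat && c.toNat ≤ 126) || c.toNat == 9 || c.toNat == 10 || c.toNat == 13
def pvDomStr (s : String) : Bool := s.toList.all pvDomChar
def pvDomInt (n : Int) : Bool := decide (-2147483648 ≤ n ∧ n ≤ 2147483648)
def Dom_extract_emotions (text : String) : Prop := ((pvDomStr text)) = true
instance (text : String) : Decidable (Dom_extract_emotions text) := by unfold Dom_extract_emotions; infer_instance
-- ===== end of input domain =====

-- B replaces A's per-label substring tests with a single left-to-right scan over the
-- text positions using an inverted keyword→label index (objective: alternative).

-- ===== PORT A =====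
-- module constant EMOTION_LEX (a dict, as an association list in insertion order)
def emotionLex : List (String × List String) :=
  [("happy", ["joy", "happy", "cheer", "delight", "optimistic", "hopeful"]),
   ("sad", ["sad", "melancholy", "bittersweet", "lonely", "regret"]),
   ("angry", ["angry", "rage", "furious", "irritated", "frustrated"]),
   ("fear", ["fear", "anxious", "afraid", "tense", "worried"]),
   ("surprise", ["surprise", "shocked", "unexpected"]),
   ("calm", ["calm", "peaceful", "serene", "relaxed"]),
   ("romance", ["love", "romantic", "tender"]),
   ("hope", ["hope", "hopeful", "aspire"])]

def extract_emotions (text : String) : List String :=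
  let t := PySem.Str.lower text
  let hits := emotionLex.foldl
    (fun hits p => if p.2.any (fun k => PySem.Str.isIn k t) then hits ++ [p.1] else hits) []
  (["happy", "calm", "hope", "romance", "surprise", "fear", "sad", "angry"]).filter
    (fun e => hits.contains e)

-- ===== PORT B =====
-- KEYWORD_INDEX = [(k, label) for label, kws in EMOTION_LEX.items() for k in kws]
def keywordIndex : List (String × String) :=
  emotionLex.flatMap (fun p => p.2.map (fun k => (k, p.1)))

-- the canonical ORDER list of Source B
def emotionOrder : List String :=
  ["happy", "calm", "hope", "romance", "surprise", "fear", "sad", "angry"]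

-- the loop 'for i in range(len(t)): … t.startswith(k, i) …' ported as structural
-- recursion over the suffixes of t: the i-th iteration sees exactly the suffix t[i:],
-- and t.startswith(k, i) is a prefix test on that suffix (exact for 0 ≤ i < len(t))
def bScan (t : List Char) (found : PySem.Set String) : PySem.Set String :=
  match t with
  | [] => found
  | c :: rest =>
    bScan rest
      (keywordIndex.foldl
        (fun f p => if PySem.Chars.startswith (c :: rest) p.1.toList then f.add p.2 else f)
        found)

def extract_emotions_alt (text : String) : List String :=
  let t := (PySem.Str.lower text).toList
  let found := bScan t PySem.Set.empty
  emotionOrder.filter (fun e => PySem.Set.contains found e)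

-- ===== PRECONDITION & SPEC =====
def Spec_extract_emotions (text : String) (out : List String) : Prop := out = extract_emotions_alt text
instance (text : String) (out : List String) : Decidable (Spec_extract_emotions text out) := by unfold Spec_extract_emotions; infer_instance

-- ===== CLAIM (what is proved, stated in full; the proofs are below) =====
def Claim_equal_extract_emotions : Prop := ∀ (text : String), Dom_extract_emotions text → Spec_extract_emotions text (extract_emotions text)

-- ===== LEMMAS AND PROOFS =====

-- A's hits loop builds exactly the first components of the lexicon entries whose test fires
theorem hits_foldl_eq (c : String × List String → Bool) (ps : List (String × List String))
    (acc : List String) :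
    ps.foldl (fun hits p => if c p then hits ++ [p.1] else hits) acc
      = acc ++ (ps.filter c).map Prod.fst := by
  induction ps generalizing acc with
  | nil => simp
  | cons p ps ih =>
    by_cases h : c p = true <;> simp [List.foldl_cons, h, ih]

-- membership of a key in the kept keys, when keys are distinct, is the test on its own entry
theorem contains_filter_keys (c : String × List String → Bool)
    (ps : List (String × List String)) (e : String) (kws : List String)
    (hmem : (e, kws) ∈ ps) (hn : (ps.map Prod.fst).Nodup) :
    ((ps.filter c).map Prod.fst).contains e = c (e, kws) := by
  induction ps with
  | nil => cases hmem
  | cons p ps ih =>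
    simp only [List.map_cons, List.nodup_cons] at hn
    rcases List.mem_cons.mp hmem with h | h
    · subst h
      by_cases hc : c (e, kws) = true
      · simp [hc]
      · simp only [Bool.not_eq_true] at hc
        rw [List.filter_cons_of_neg (by simp [hc]), hc]
        have hnot : e ∉ (ps.filter c).map Prod.fst := by
          intro hm
          rcases List.mem_map.mp hm with ⟨q, hq, hqe⟩
          exact hn.1 (List.mem_map.mpr ⟨q, (List.mem_filter.mp hq).1, hqe⟩)
        simpa using hnot
    · have hne : p.1 ≠ e := by
        intro hpe
        exact hn.1 (hpe ▸ List.mem_map.mpr ⟨(e, kws), h, rfl⟩)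
      by_cases hc : c p = true
      · rw [List.filter_cons_of_pos hc, List.map_cons, List.contains_cons, ih h hn.2,
          beq_eq_false_iff_ne.mpr (Ne.symm hne), Bool.false_or]
      · rw [List.filter_cons_of_neg (by simp [hc])]
        exact ih h hn.2

-- adding an element to a PySem.Set: membership afterwards = old membership or equality
theorem mem_set_add_decide (s : PySem.Set String) (x y : String) :
    decide (y ∈ PySem.Set.add s x) = (decide (y ∈ s) || y == x) := by
  by_cases h1 : y ∈ s <;> by_cases h2 : y = x <;>
    simp [PySem.Set.mem_add, h1, h2]

-- B's inner fold over the keyword index: membership afterwards = before, or some entry fires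
theorem inner_fold_contains (cond : String → Bool) (idx : List (String × String))
    (f : PySem.Set String) (e : String) :
    decide (e ∈ idx.foldl (fun f p => if cond p.1 then PySem.Set.add f p.2 else f) f)
      = (decide (e ∈ f) || idx.any (fun p => e == p.2 && cond p.1)) := by
  induction idx generalizing f with
  | nil => simp
  | cons p ps ih =>
    by_cases h : cond p.1 = true
    · rw [List.foldl_cons, if_pos h, ih, mem_set_add_decide]
      simp [h, Bool.or_assoc]
    · simp [List.foldl_cons, h, ih]

-- B's suffix scan: membership afterwards = before, or some position of the text fires
theorem bScan_contains (t : List Char) (f : PySem.Set String) (e : String) :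
    decide (e ∈ bScan t f)
      = (decide (e ∈ f) || (List.range t.length).any (fun i => keywordIndex.any
          (fun p => e == p.2 && PySem.Chars.startswith (t.drop i) p.1.toList))) := by
  induction t generalizing f with
  | nil => simp [bScan]
  | cons c rest ih =>
    rw [bScan, ih,
      inner_fold_contains (fun k => PySem.Chars.startswith (c :: rest) k.toList) keywordIndex f e,
      List.length_cons, List.range_succ_eq_map]
    simp [List.any_cons, List.any_map, Function.comp_def, List.drop_succ_cons, Bool.or_assoc]

-- the two nested any's over positions and index entries commute
theorem any_swap (g : Nat → String → Bool) (idx : List (String × String))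
    (is : List Nat) (e : String) :
    is.any (fun i => idx.any (fun p => e == p.2 && g i p.1))
      = idx.any (fun p => e == p.2 && is.any (fun i => g i p.1)) := by
  rw [Bool.eq_iff_iff]
  simp only [List.any_eq_true, Bool.and_eq_true, beq_iff_eq]
  constructor
  · rintro ⟨i, hi, p, hp, he, hg⟩; exact ⟨p, hp, he, i, hi, hg⟩
  · rintro ⟨p, hp, he, i, hi, hg⟩; exact ⟨i, hi, p, hp, he, hg⟩

-- a nonempty keyword occurs in a text iff it starts at some position of the text
theorem range_startswith_eq_isIn (k s : List Char) (hk : k ≠ []) :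
    (List.range s.length).any (fun i => PySem.Chars.startswith (s.drop i) k)
      = PySem.Chars.isIn k s := by
  rw [Bool.eq_iff_iff, List.any_eq_true, ← PySem.Chars.exists_prefix_drop_iff_isIn]
  constructor
  · rintro ⟨i, _, hi⟩
    rw [PySem.Chars.startswith_iff] at hi
    exact ⟨i, hi⟩
  · rintro ⟨j, hj⟩
    have hjlt : j < s.length := by
      by_contra hge
      have hnil : s.drop j = [] := List.drop_eq_nil_of_le (by omega)
      rw [hnil] at hj
      exact hk (List.prefix_nil.mp hj)
    exact ⟨j, List.mem_range.mpr hjlt, by rw [PySem.Chars.startswith_iff]; exact hj⟩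

-- ===== VERDICT (by name: the statement is the Claim_ definition above) =====
theorem extract_emotions_spec : Claim_equal_extract_emotions := by
  intro text _
  unfold Spec_extract_emotions extract_emotions extract_emotions_alt emotionOrder
  simp only [hits_foldl_eq, List.nil_append]
  apply List.filter_congr
  intro e he
  have hB := bScan_contains (PySem.Str.lower text).toList PySem.Set.empty e
  simp only [PySem.Set.contains_eq_listContains, List.contains_eq_mem]
  rw [hB, any_swap (fun i k => PySem.Chars.startswith ((PySem.Str.lower text).toList.drop i) k.toList)
    keywordIndex (List.range (PySem.Str.lower text).toList.length) e]
  simp only [PySem.Set.empty, List.not_mem_nil, decide_false, Bool.false_or]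
  fin_cases he
  · rw [← List.contains_eq_mem,
        contains_filter_keys _ _ _ ["joy", "happy", "cheer", "delight", "optimistic", "hopeful"] (by decide) (by decide)]
    simp only [keywordIndex, emotionLex, List.flatMap_cons, List.flatMap_nil, List.map_cons,
      List.map_nil, List.any_append, List.any_cons,
      List.any_nil]
    simp [range_startswith_eq_isIn ['j', 'o', 'y'] (PySem.Chars.lower text.toList) (by decide), range_startswith_eq_isIn ['h', 'a', 'p', 'p', 'y'] (PySem.Chars.lower text.toList) (by decide), range_startswith_eq_isIn ['c', 'h', 'e', 'e', 'r'] (PySem.Chars.lower text.toList) (by decide), range_startswith_eq_isIn ['d', 'e', 'l', 'i', 'g', 'h', 't'] (PySem.Chars.lower text.toList) (by decide), range_startswith_eq_isIn ['o', 'p', 't', 'i', 'm', 'i', 's', 't', 'i', 'c'] (PySem.Chars.lower text.toList) (by decide), range_startswith_eq_isIn ['h', 'o', 'p', 'e', 'f', 'u', 'l'] (PySem.Chars.lower text.toList) (by decide)]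
  · rw [← List.contains_eq_mem,
        contains_filter_keys _ _ _ ["calm", "peaceful", "serene", "relaxed"] (by decide) (by decide)]
    simp only [keywordIndex, emotionLex, List.flatMap_cons, List.flatMap_nil, List.map_cons,
      List.map_nil, List.any_append, List.any_cons,
      List.any_nil]
    simp [range_startswith_eq_isIn ['c', 'a', 'l', 'm'] (PySem.Chars.lower text.toList) (by decide), range_startswith_eq_isIn ['p', 'e', 'a', 'c', 'e', 'f', 'u', 'l'] (PySem.Chars.lower text.toList) (by decide), range_startswith_eq_isIn ['s', 'e', 'r', 'e', 'n', 'e'] (PySem.Chars.lower text.toList) (by decide), range_startswith_eq_isIn ['r', 'e', 'l', 'a', 'x', 'e', 'd'] (PySem.Chars.lower text.toList) (by decide)]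
  · rw [← List.contains_eq_mem,
        contains_filter_keys _ _ _ ["hope", "hopeful", "aspire"] (by decide) (by decide)]
    simp only [keywordIndex, emotionLex, List.flatMap_cons, List.flatMap_nil, List.map_cons,
      List.map_nil, List.any_append, List.any_cons,
      List.any_nil]
    simp [range_startswith_eq_isIn ['h', 'o', 'p', 'e'] (PySem.Chars.lower text.toList) (by decide), range_startswith_eq_isIn ['h', 'o', 'p', 'e', 'f', 'u', 'l'] (PySem.Chars.lower text.toList) (by decide), range_startswith_eq_isIn ['a', 's', 'p', 'i', 'r', 'e'] (PySem.Chars.lower text.toList) (by decide)]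
  · rw [← List.contains_eq_mem,
        contains_filter_keys _ _ _ ["love", "romantic", "tender"] (by decide) (by decide)]
    simp only [keywordIndex, emotionLex, List.flatMap_cons, List.flatMap_nil, List.map_cons,
      List.map_nil, List.any_append, List.any_cons,
      List.any_nil]
    simp [range_startswith_eq_isIn ['l', 'o', 'v', 'e'] (PySem.Chars.lower text.toList) (by decide), range_startswith_eq_isIn ['r', 'o', 'm', 'a', 'n', 't', 'i', 'c'] (PySem.Chars.lower text.toList) (by decide), range_startswith_eq_isIn ['t', 'e', 'n', 'd', 'e', 'r'] (PySem.Chars.lower text.toList) (by decide)]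
  · rw [← List.contains_eq_mem,
        contains_filter_keys _ _ _ ["surprise", "shocked", "unexpected"] (by decide) (by decide)]
    simp only [keywordIndex, emotionLex, List.flatMap_cons, List.flatMap_nil, List.map_cons,
      List.map_nil, List.any_append, List.any_cons,
      List.any_nil]
    simp [range_startswith_eq_isIn ['s', 'u', 'r', 'p', 'r', 'i', 's', 'e'] (PySem.Chars.lower text.toList) (by decide), range_startswith_eq_isIn ['s', 'h', 'o', 'c', 'k', 'e', 'd'] (PySem.Chars.lower text.toList) (by decide), range_startswith_eq_isIn ['u', 'n', 'e', 'x', 'p', 'e', 'c', 't', 'e', 'd'] (PySem.Chars.lower text.toList) (by decide)]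
  · rw [← List.contains_eq_mem,
        contains_filter_keys _ _ _ ["fear", "anxious", "afraid", "tense", "worried"] (by decide) (by decide)]
    simp only [keywordIndex, emotionLex, List.flatMap_cons, List.flatMap_nil, List.map_cons,
      List.map_nil, List.any_append, List.any_cons,
      List.any_nil]
    simp [range_startswith_eq_isIn ['f', 'e', 'a', 'r'] (PySem.Chars.lower text.toList) (by decide), range_startswith_eq_isIn ['a', 'n', 'x', 'i', 'o', 'u', 's'] (PySem.Chars.lower text.toList) (by decide), range_startswith_eq_isIn ['a', 'f', 'r', 'a', 'i', 'd'] (PySem.Chars.lower text.toList) (by decide), range_startswith_eq_isIn ['t', 'e', 'n', 's', 'e'] (PySem.Chars.lower text.toList) (by decide), range_startswith_eq_isIn ['w', 'o', 'r', 'r', 'i', 'e', 'd'] (PySem.Chars.lower text.toList) (by decide)]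
  · rw [← List.contains_eq_mem,
        contains_filter_keys _ _ _ ["sad", "melancholy", "bittersweet", "lonely", "regret"] (by decide) (by decide)]
    simp only [keywordIndex, emotionLex, List.flatMap_cons, List.flatMap_nil, List.map_cons,
      List.map_nil, List.any_append, List.any_cons,
      List.any_nil]
    simp [range_startswith_eq_isIn ['s', 'a', 'd'] (PySem.Chars.lower text.toList) (by decide), range_startswith_eq_isIn ['m', 'e', 'l', 'a', 'n', 'c', 'h', 'o', 'l', 'y'] (PySem.Chars.lower text.toList) (by decide), range_startswith_eq_isIn ['b', 'i', 't', 't', 'e', 'r', 's', 'w', 'e', 'e', 't'] (PySem.Chars.lower text.toList) (by decide), range_startswith_eq_isIn ['l', 'o', 'n', 'e', 'l', 'y'] (PySem.Chars.lower text.toList) (by decide), range_startswith_eq_isIn ['r', 'e', 'g', 'r', 'e', 't'] (PySem.Chars.lower text.toList) (by decide)]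
  · rw [← List.contains_eq_mem,
        contains_filter_keys _ _ _ ["angry", "rage", "furious", "irritated", "frustrated"] (by decide) (by decide)]
    simp only [keywordIndex, emotionLex, List.flatMap_cons, List.flatMap_nil, List.map_cons,
      List.map_nil, List.any_append, List.any_cons,
      List.any_nil]
    simp [range_startswith_eq_isIn ['a', 'n', 'g', 'r', 'y'] (PySem.Chars.lower text.toList) (by decide), range_startswith_eq_isIn ['r', 'a', 'g', 'e'] (PySem.Chars.lower text.toList) (by decide), range_startswith_eq_isIn ['f', 'u', 'r', 'i', 'o', 'u', 's'] (PySem.Chars.lower text.toList) (by decide), range_startswith_eq_isIn ['i', 'r', 'r', 'i', 't', 'a', 't', 'e', 'd'] (PySem.Chars.lower text.toList) (by decide), range_startswith_eq_isIn ['f', 'r', 'u', 's', 't', 'r', 'a', 't', 'e', 'd'] (PySem.Chars.lower text.toList) (by decide)]
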